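-- pv_equiv track=rewrite | github.com/MihirRajak91/book_appointment_with_ai_tools | book_appointment.py | correct_typos
-- ===== SOURCE A (Python) =====
-- def correct_typos(user_input):
--     """
--     Corrects common typos in the user input.
--     """
--     corrections = {
--         "moday": "monday",
--         "tuesay": "tuesday",
--         "wedesday": "wednesday",
--         "thrusday": "thursday",
--         "firday": "friday",
--         "satureday": "saturday",
--         "sundayy": "sunday"
--     }
--     for typo, correct in corrections.items():
--         user_input = user_input.lower().replace(typo, correct)
--     return user_input
-- ===== SOURCE B (Python) =====
-- def correct_typos(user_input):
--     """
--     Corrects common typos in the user input.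
--     """
--     typo_fixes = [
--         ("moday", "monday"),
--         ("tuesay", "tuesday"),
--         ("wedesday", "wednesday"),
--         ("thrusday", "thursday"),
--         ("firday", "friday"),
--         ("satureday", "saturday"),
--         ("sundayy", "sunday"),
--     ]
--     s = user_input.lower()
--     out = []
--     i = 0
--     while i < len(s):
--         for typo, correct in typo_fixes:
--             if s.startswith(typo, i):
--                 out.append(correct)
--                 i += len(typo)
--                 break
--         else:
--             out.append(s[i])
--             i += 1
--     return "".join(out)
-- ===== Notes on version B (the rewrite author's own statement) =====
-- stated objective: alternative
-- what changed: Replaces seven sequential lower()+str.replace passes over the whole string by lowercasing once and a single left-to-right scan that tries each typo at the current position and emits the correction or copies the character.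
import Mathlib
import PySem

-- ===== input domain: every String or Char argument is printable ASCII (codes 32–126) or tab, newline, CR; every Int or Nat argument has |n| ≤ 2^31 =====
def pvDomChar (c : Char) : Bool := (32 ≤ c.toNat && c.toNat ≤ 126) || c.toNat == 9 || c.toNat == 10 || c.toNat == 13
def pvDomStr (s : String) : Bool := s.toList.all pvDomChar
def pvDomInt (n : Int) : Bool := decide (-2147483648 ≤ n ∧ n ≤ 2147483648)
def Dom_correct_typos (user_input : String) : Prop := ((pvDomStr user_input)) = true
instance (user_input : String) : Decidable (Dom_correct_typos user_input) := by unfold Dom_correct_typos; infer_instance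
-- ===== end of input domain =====

set_option maxRecDepth 2048


-- B replaces A's seven sequential lower()+str.replace passes by lowercasing once and a single
-- left-to-right scan that substitutes the first matching typo at each position (alternative, same cost).

-- ===== PORT A =====
-- A's corrections dict (string keys in insertion order)
def pvCorrectionsA : List (String × String) :=
  [("moday", "monday"), ("tuesay", "tuesday"), ("wedesday", "wednesday"),
   ("thrusday", "thursday"), ("firday", "friday"), ("satureday", "saturday"),
   ("sundayy", "sunday")]

-- A: for typo, correct in corrections.items(): user_input = user_input.lower().replace(typo, correct)
def correct_typos (user_input : String) : String :=
  pvCorrectionsA.foldl (fun s kv => PySem.Str.replace (PySem.Str.lower s) kv.1 kv.2) user_input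

-- ===== PORT B =====
-- B's typo→correction pairs (dict order preserved)
def pvCorrectionsB : List (String × String) :=
  [("moday", "monday"), ("tuesay", "tuesday"), ("wedesday", "wednesday"),
   ("thrusday", "thursday"), ("firday", "friday"), ("satureday", "saturday"),
   ("sundayy", "sunday")]

def pvTblB : List (List Char × List Char) :=
  pvCorrectionsB.map (fun kv => (kv.1.toList, kv.2.toList))

-- hand port of B's while/for-else loop, exact: at each position i it tries the typos in dict
-- order (s.startswith(typo, i)); on the first hit it emits the correction and jumps past the
-- typo, otherwise it copies s[i]; output built left to right.
def pvScan (tbl : List (List Char × List Char)) : List Char → List Char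
  | [] => []
  | c :: t =>
    match tbl.find? (fun kv => kv.1.isPrefixOf (c :: t)) with
    | some kv => kv.2 ++ pvScan tbl (t.drop (kv.1.length - 1))
    | none => c :: pvScan tbl t
termination_by l => l.length
decreasing_by all_goals (simp [List.length_drop]; try omega)

-- B: return "".join(out) for s = user_input.lower()
def correct_typos_alt (user_input : String) : String :=
  String.ofList (pvScan pvTblB (PySem.Str.lower user_input).toList)

-- ===== PRECONDITION & SPEC =====
def Spec_correct_typos (user_input : String) (out : String) : Prop := out = correct_typos_alt user_input
instance (user_input : String) (out : String) : Decidable (Spec_correct_typos user_input out) := by unfold Spec_correct_typos; infer_instance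

-- ===== CLAIM (what is proved, stated in full; the proofs are below) =====
def Claim_equal_correct_typos : Prop := ∀ (user_input : String), Dom_correct_typos user_input → Spec_correct_typos user_input (correct_typos user_input)

-- ===== LEMMAS AND PROOFS =====

-- the seven typo/correction pairs as char lists
def pvK1 : List Char := ['m','o','d','a','y']
def pvV1 : List Char := ['m','o','n','d','a','y']
def pvK2 : List Char := ['t','u','e','s','a','y']
def pvV2 : List Char := ['t','u','e','s','d','a','y']
def pvK3 : List Char := ['w','e','d','e','s','d','a','y']
def pvV3 : List Char := ['w','e','d','n','e','s','d','a','y']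
def pvK4 : List Char := ['t','h','r','u','s','d','a','y']
def pvV4 : List Char := ['t','h','u','r','s','d','a','y']
def pvK5 : List Char := ['f','i','r','d','a','y']
def pvV5 : List Char := ['f','r','i','d','a','y']
def pvK6 : List Char := ['s','a','t','u','r','e','d','a','y']
def pvV6 : List Char := ['s','a','t','u','r','d','a','y']
def pvK7 : List Char := ['s','u','n','d','a','y','y']
def pvV7 : List Char := ['s','u','n','d','a','y']

def pvTbl : List (List Char × List Char) :=
  [(pvK1, pvV1), (pvK2, pvV2), (pvK3, pvV3), (pvK4, pvV4), (pvK5, pvV5), (pvK6, pvV6), (pvK7, pvV7)]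

-- structural model of one Python str.replace pass (leftmost, non-overlapping, nonempty pattern)
def pvRep (old new : List Char) : List Char → List Char
  | [] => []
  | c :: t =>
    if old.isPrefixOf (c :: t) then new ++ pvRep old new (t.drop (old.length - 1))
    else c :: pvRep old new t
termination_by l => l.length
decreasing_by all_goals (simp [List.length_drop]; try omega)

-- A's seven passes, innermost first
def pvChain (l : List Char) : List Char :=
  pvRep pvK7 pvV7 (pvRep pvK6 pvV6 (pvRep pvK5 pvV5 (pvRep pvK4 pvV4
    (pvRep pvK3 pvV3 (pvRep pvK2 pvV2 (pvRep pvK1 pvV1 l))))))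

theorem pvRep_nil (old new : List Char) : pvRep old new [] = [] := by simp [pvRep]

theorem pvRep_cons_pos (old new : List Char) {c : Char} {t : List Char}
    (h : old.isPrefixOf (c :: t) = true) :
    pvRep old new (c :: t) = new ++ pvRep old new (t.drop (old.length - 1)) := by
  rw [pvRep]; simp [h]

theorem pvRep_cons_neg (old new : List Char) {c : Char} {t : List Char}
    (h : old.isPrefixOf (c :: t) = false) :
    pvRep old new (c :: t) = c :: pvRep old new t := by
  rw [pvRep]; simp [h]

theorem pvNotPrefix_bool {k l : List Char} (h : ¬ k <+: l) : k.isPrefixOf l = false := by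
  rw [← Bool.not_eq_true, List.isPrefixOf_iff_prefix]; exact h

-- PySem.Chars.replace.go computes pvRep (fuel ≥ length, nonempty pattern)
theorem pvGo_spec (old new : List Char) (hold : old ≠ []) :
    ∀ (fuel : Nat) (l acc : List Char), l.length ≤ fuel →
      PySem.Chars.replace.go old new fuel l acc = acc.reverse ++ pvRep old new l := by
  intro fuel
  induction fuel with
  | zero =>
    intro l acc h
    cases l with
    | nil => rw [PySem.Chars.replace.go]; simp [pvRep_nil]
    | cons c t => simp at h
  | succ n ih =>
    intro l acc h
    cases l with
    | nil => rw [PySem.Chars.replace.go] <;> simp [pvRep_nil]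
    | cons c t =>
      obtain ⟨o, os, rfl⟩ : ∃ o os, old = o :: os := by
        cases old with
        | nil => exact absurd rfl hold
        | cons o os => exact ⟨o, os, rfl⟩
      rw [PySem.Chars.replace.go]
      by_cases hp : (o :: os).isPrefixOf (c :: t) = true
      · rw [if_pos hp]
        have hle : ((c :: t).drop (o :: os).length).length ≤ n := by
          simp [List.length_drop]
          simp at h
          omega
        rw [ih _ _ hle, pvRep_cons_pos _ _ hp]
        have hdr : (c :: t).drop (o :: os).length = t.drop ((o :: os).length - 1) := by
          simp [List.drop_succ_cons]
        rw [hdr]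
        simp
      · rw [if_neg hp]
        have hle : t.length ≤ n := by simp at h; omega
        rw [ih _ _ hle, pvRep_cons_neg _ _ (by simpa only [Bool.not_eq_true] using hp)]
        simp

theorem pvReplace_eq (old new s : List Char) (hold : old ≠ []) :
    PySem.Chars.replace s old new = pvRep old new s := by
  rw [PySem.Chars.replace, if_neg (by simp [List.isEmpty_iff, hold])]
  rw [pvGo_spec old new hold s.length s [] le_rfl]
  simp

-- "x and y agree on their overlap"
def pvCompat (x y : List Char) : Bool := x.take y.length == y.take x.length

def pvCondAll (k v : List Char) : Bool := (List.range k.length).all fun p => !(pvCompat (k.drop p) v)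

theorem pvCondAll_spec {k v : List Char} (h : pvCondAll k v = true) :
    ∀ p, p < k.length → pvCompat (k.drop p) v = false := by
  intro p hp
  rw [pvCondAll] at h
  have := List.all_eq_true.mp h p (List.mem_range.mpr hp)
  simpa using this

theorem pvTake_eq_of_prefix_append (k w t : List Char) (h : k <+: w ++ t) :
    k.take w.length = w.take k.length := by
  have hk : k = (w ++ t).take k.length := List.prefix_iff_eq_take.mp h
  conv_lhs => rw [hk]
  rw [List.take_take]
  conv_rhs => rw [show w = (w ++ t).take w.length from (List.take_left ..).symm]
  rw [List.take_take, Nat.min_comm]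

theorem pvCompat_pa (k w t : List Char) (h : k <+: w ++ t) : pvCompat k w = true := by
  simp [pvCompat, pvTake_eq_of_prefix_append k w t h]

theorem pvCompat_pa' (k w t : List Char) (h : k <+: w ++ t) : pvCompat w k = true := by
  simp [pvCompat, pvTake_eq_of_prefix_append k w t h]

-- a pass whose pattern cannot match inside (or straddling out of) w passes w through
theorem pvPass (old new : List Char) (w : List Char)
    (hc : ∀ p, p < w.length → pvCompat (w.drop p) old = false) :
    ∀ t, pvRep old new (w ++ t) = w ++ pvRep old new t := by
  induction w with
  | nil => intro t; simp
  | cons c w' ih =>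
    intro t
    have hnp : old.isPrefixOf (c :: (w' ++ t)) = false := by
      apply pvNotPrefix_bool
      intro hpre
      have hcomp := pvCompat_pa' old (c :: w') t (by simpa using hpre)
      have h0 := hc 0 (by simp)
      simp at h0
      rw [h0] at hcomp
      exact absurd hcomp (by simp)
    have ih' := ih (fun p hp => by
      have := hc (p + 1) (by simpa using Nat.succ_lt_succ hp)
      simpa [List.drop_succ_cons] using this)
    rw [show (c :: w') ++ t = c :: (w' ++ t) from rfl, pvRep_cons_neg _ _ hnp, ih' t]
    rfl

-- a pass hits its own pattern at the head
theorem pvHead (old new : List Char) (t : List Char) (hold : old ≠ []) :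
    pvRep old new (old ++ t) = new ++ pvRep old new t := by
  obtain ⟨o, os, rfl⟩ : ∃ o os, old = o :: os := by
    cases old with
    | nil => exact absurd rfl hold
    | cons o os => exact ⟨o, os, rfl⟩
  have hp : (o :: os).isPrefixOf (o :: (os ++ t)) = true := by
    rw [List.isPrefixOf_iff_prefix]
    exact ⟨t, by simp⟩
  rw [show (o :: os) ++ t = o :: (os ++ t) from rfl, pvRep_cons_pos _ _ hp]
  have hlen : (o :: os).length - 1 = os.length := by simp
  rw [hlen, List.drop_left]

-- a prefix that a pass's replacement text cannot produce was already a prefix of the input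
theorem pvTransfer (old new : List Char) (k0 : List Char)
    (hc : ∀ p, p < k0.length → pvCompat (k0.drop p) new = false) :
    ∀ (n : Nat) (s : List Char), s.length ≤ n → ∀ q,
      k0.drop q <+: pvRep old new s → k0.drop q <+: s := by
  intro n
  induction n with
  | zero =>
    intro s hs q h
    cases s with
    | nil => rwa [pvRep_nil] at h
    | cons c t => simp at hs
  | succ n ih =>
    intro s hs q h
    cases s with
    | nil => rwa [pvRep_nil] at h
    | cons c t =>
      by_cases hq : k0.length ≤ q
      · simp [List.drop_eq_nil_of_le hq]
      replace hq : q < k0.length := by omega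
      by_cases hp : old.isPrefixOf (c :: t) = true
      · rw [pvRep_cons_pos _ _ hp] at h
        have hcomp := pvCompat_pa _ _ _ h
        rw [hc q hq] at hcomp
        exact absurd hcomp (by simp)
      · rw [pvRep_cons_neg _ _ (by simpa only [Bool.not_eq_true] using hp)] at h
        have hne : k0.drop q ≠ [] := by
          intro hnil
          exact absurd (List.drop_eq_nil_iff.mp hnil) (by omega)
        obtain ⟨x, xs, hx⟩ : ∃ x xs, k0.drop q = x :: xs := by
          cases hxx : k0.drop q with
          | nil => exact absurd hxx hne
          | cons x xs => exact ⟨x, xs, rfl⟩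
        rw [hx] at h ⊢
        rcases List.cons_prefix_cons.mp h with ⟨rfl, hxs⟩
        have hxs' : k0.drop (q + 1) = xs := by
          rw [← List.tail_drop, hx]
          rfl
        have ht : t.length ≤ n := by simp at hs; omega
        have := ih t ht (q + 1) (by rw [hxs']; exact hxs)
        rw [hxs'] at this
        exact List.cons_prefix_cons.mpr ⟨rfl, this⟩

theorem pvConsTransfer (old new k : List Char) (hc : pvCondAll k new = true)
    (c : Char) (t : List Char) (h : ¬ k <+: (c :: t)) : ¬ k <+: (c :: pvRep old new t) := by
  intro hp
  apply h
  cases k with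
  | nil => exact List.nil_prefix
  | cons x xs =>
    rcases List.cons_prefix_cons.mp hp with ⟨rfl, hxs⟩
    have h1 : (x :: xs).drop 1 = xs := rfl
    have := pvTransfer old new (x :: xs) (pvCondAll_spec hc) t.length t le_rfl 1
      (by rw [h1]; exact hxs)
    rw [h1] at this
    exact List.cons_prefix_cons.mpr ⟨rfl, this⟩

-- every char a pass outputs is a char of the replacement text or of the input
theorem pvRep_mem (old new : List Char) :
    ∀ (n : Nat) (s : List Char), s.length ≤ n → ∀ c, c ∈ pvRep old new s → c ∈ new ∨ c ∈ s := by
  intro n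
  induction n with
  | zero =>
    intro s hs c h
    cases s with
    | nil => rw [pvRep_nil] at h; simp at h
    | cons a t => simp at hs
  | succ n ih =>
    intro s hs c h
    cases s with
    | nil => rw [pvRep_nil] at h; simp at h
    | cons a t =>
      by_cases hp : old.isPrefixOf (a :: t) = true
      · rw [pvRep_cons_pos _ _ hp] at h
        rcases List.mem_append.mp h with h' | h'
        · exact Or.inl h'
        · have hle : (t.drop (old.length - 1)).length ≤ n := by
            simp [List.length_drop]; simp at hs; omega
          rcases ih _ hle c h' with h'' | h''
          · exact Or.inl h''
          · exact Or.inr (List.mem_cons_of_mem _ (List.mem_of_mem_drop h''))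
      · rw [pvRep_cons_neg _ _ (by simpa only [Bool.not_eq_true] using hp)] at h
        rcases List.mem_cons.mp h with h' | h'
        · exact Or.inr (h' ▸ List.mem_cons_self ..)
        · have hle : t.length ≤ n := by simp at hs; omega
          rcases ih _ hle c h' with h'' | h''
          · exact Or.inl h''
          · exact Or.inr (List.mem_cons_of_mem _ h'')

-- lowercasing facts
theorem pvIsupper_lowerChar (c : Char) : PySem.Chars.isupper (PySem.Chars.lowerChar c) = false := by
  by_cases h : PySem.Chars.isupper c = true
  · have hb : 65 ≤ c.toNat ∧ c.toNat ≤ 90 := by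
      simp [PySem.Chars.isupper, Char.le_def] at h; exact ⟨h.1, h.2⟩
    have hv : (c.toNat + 32).isValidChar := Or.inl (by omega)
    have ht : (Char.ofNat (c.toNat + 32)).toNat = c.toNat + 32 := by
      have := Char.toNat_ofNat (c.toNat + 32)
      simp [hv] at this
      exact this
    rw [PySem.Chars.lowerChar, if_pos h]
    simp [PySem.Chars.isupper, Char.le_def, UInt32.le_iff_toNat_le]
    omega
  · simp at h
    rw [PySem.Chars.lowerChar, if_neg (by simp [h])]
    simp [h]

theorem pvLowerChar_fix {c : Char} (h : PySem.Chars.isupper c = false) :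
    PySem.Chars.lowerChar c = c := by
  simp [PySem.Chars.lowerChar, h]

theorem pvLower_fix (s : List Char) (h : ∀ c ∈ s, PySem.Chars.isupper c = false) :
    PySem.Chars.lower s = s := by
  induction s with
  | nil => rfl
  | cons c t ih =>
    rw [PySem.Chars.lower, List.map_cons]
    rw [show List.map PySem.Chars.lowerChar t = PySem.Chars.lower t from rfl]
    rw [ih (fun c hc => h c (List.mem_cons_of_mem _ hc)),
      pvLowerChar_fix (h c (List.mem_cons_self ..))]

theorem pvNoUpper_lower (x : List Char) :
    ∀ c ∈ PySem.Chars.lower x, PySem.Chars.isupper c = false := by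
  intro c hc
  rw [PySem.Chars.lower] at hc
  rcases List.mem_map.mp hc with ⟨d, _, rfl⟩
  exact pvIsupper_lowerChar d

theorem pvNoUpper_rep (old new s : List Char)
    (hs : ∀ c ∈ s, PySem.Chars.isupper c = false)
    (hn : ∀ c ∈ new, PySem.Chars.isupper c = false) :
    ∀ c ∈ pvRep old new s, PySem.Chars.isupper c = false := by
  intro c hc
  rcases pvRep_mem old new s.length s le_rfl c hc with h | h
  · exact hn c h
  · exact hs c h

-- A's port computed on the char-list side
theorem pvA_toList (u : String) :
    (correct_typos u).toList = pvChain (PySem.Chars.lower u.toList) := by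
  have step : ∀ (s : String) (a b : String), a.toList ≠ [] →
      (PySem.Str.replace (PySem.Str.lower s) a b).toList
        = pvRep a.toList b.toList (PySem.Chars.lower s.toList) := by
    intro s a b h
    simp [PySem.Str.replace, PySem.Str.lower, String.toList_ofList]
    exact pvReplace_eq _ _ _ h
  simp only [correct_typos, pvCorrectionsA, List.foldl_cons, List.foldl_nil]
  rw [step _ "sundayy" "sunday" (by decide), step _ "satureday" "saturday" (by decide),
    step _ "firday" "friday" (by decide), step _ "thrusday" "thursday" (by decide),
    step _ "wedesday" "wednesday" (by decide), step _ "tuesay" "tuesday" (by decide),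
    step _ "moday" "monday" (by decide)]
  simp only [show ("moday" : String).toList = pvK1 from rfl, show ("monday" : String).toList = pvV1 from rfl,
    show ("tuesay" : String).toList = pvK2 from rfl, show ("tuesday" : String).toList = pvV2 from rfl,
    show ("wedesday" : String).toList = pvK3 from rfl, show ("wednesday" : String).toList = pvV3 from rfl,
    show ("thrusday" : String).toList = pvK4 from rfl, show ("thursday" : String).toList = pvV4 from rfl,
    show ("firday" : String).toList = pvK5 from rfl, show ("friday" : String).toList = pvV5 from rfl,
    show ("satureday" : String).toList = pvK6 from rfl, show ("saturday" : String).toList = pvV6 from rfl,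
    show ("sundayy" : String).toList = pvK7 from rfl, show ("sunday" : String).toList = pvV7 from rfl]
  have q1 : ∀ c ∈ pvRep pvK1 pvV1 (PySem.Chars.lower u.toList), PySem.Chars.isupper c = false :=
    pvNoUpper_rep _ _ _ (pvNoUpper_lower _) (by intro c hc; fin_cases hc <;> rfl)
  rw [pvLower_fix _ q1]
  have q2 : ∀ c ∈ pvRep pvK2 pvV2 (pvRep pvK1 pvV1 (PySem.Chars.lower u.toList)),
      PySem.Chars.isupper c = false := pvNoUpper_rep _ _ _ q1 (by intro c hc; fin_cases hc <;> rfl)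
  rw [pvLower_fix _ q2]
  have q3 : ∀ c ∈ pvRep pvK3 pvV3 (pvRep pvK2 pvV2 (pvRep pvK1 pvV1 (PySem.Chars.lower u.toList))),
      PySem.Chars.isupper c = false := pvNoUpper_rep _ _ _ q2 (by intro c hc; fin_cases hc <;> rfl)
  rw [pvLower_fix _ q3]
  have q4 : ∀ c ∈ pvRep pvK4 pvV4 (pvRep pvK3 pvV3 (pvRep pvK2 pvV2 (pvRep pvK1 pvV1
      (PySem.Chars.lower u.toList)))), PySem.Chars.isupper c = false :=
    pvNoUpper_rep _ _ _ q3 (by intro c hc; fin_cases hc <;> rfl)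
  rw [pvLower_fix _ q4]
  have q5 : ∀ c ∈ pvRep pvK5 pvV5 (pvRep pvK4 pvV4 (pvRep pvK3 pvV3 (pvRep pvK2 pvV2
      (pvRep pvK1 pvV1 (PySem.Chars.lower u.toList))))), PySem.Chars.isupper c = false :=
    pvNoUpper_rep _ _ _ q4 (by intro c hc; fin_cases hc <;> rfl)
  rw [pvLower_fix _ q5]
  have q6 : ∀ c ∈ pvRep pvK6 pvV6 (pvRep pvK5 pvV5 (pvRep pvK4 pvV4 (pvRep pvK3 pvV3
      (pvRep pvK2 pvV2 (pvRep pvK1 pvV1 (PySem.Chars.lower u.toList)))))),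
      PySem.Chars.isupper c = false := pvNoUpper_rep _ _ _ q5 (by intro c hc; fin_cases hc <;> rfl)
  rw [pvLower_fix _ q6]
  rfl

theorem pvMain : ∀ (n : Nat) (l : List Char), l.length ≤ n → pvChain l = pvScan pvTbl l := by
  intro n
  induction n with
  | zero =>
    intro l hl
    cases l with
    | nil => rw [pvScan]; simp [pvChain, pvRep_nil]
    | cons c t => simp at hl
  | succ n ih =>
    intro l hl
    cases l with
    | nil => rw [pvScan]; simp [pvChain, pvRep_nil]
    | cons c t =>
      have ht : t.length ≤ n := by simp at hl; omega
      by_cases h1 : pvK1.isPrefixOf (c :: t) = true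
      · have hpre : pvK1 <+: (c :: t) := List.isPrefixOf_iff_prefix.mp h1
        have heq : pvK1 ++ (c :: t).drop pvK1.length = c :: t := List.prefix_iff_eq_append.mp hpre
        have hf : List.find? (fun kv => kv.1.isPrefixOf (c :: t)) pvTbl = some (pvK1, pvV1) := by
          simp [pvTbl, h1]
        have rhs : pvScan pvTbl (c :: t) = pvV1 ++ pvScan pvTbl (t.drop (pvK1.length - 1)) := by
          rw [pvScan, hf]
        have lhs : pvChain (c :: t) = pvV1 ++ pvChain ((c :: t).drop pvK1.length) := by
          conv_lhs => rw [← heq]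
          simp only [pvChain]
          rw [pvHead pvK1 pvV1 _ (by decide)]
          rw [pvPass pvK2 pvV2 pvV1 (pvCondAll_spec (by decide))]
          rw [pvPass pvK3 pvV3 pvV1 (pvCondAll_spec (by decide))]
          rw [pvPass pvK4 pvV4 pvV1 (pvCondAll_spec (by decide))]
          rw [pvPass pvK5 pvV5 pvV1 (pvCondAll_spec (by decide))]
          rw [pvPass pvK6 pvV6 pvV1 (pvCondAll_spec (by decide))]
          rw [pvPass pvK7 pvV7 pvV1 (pvCondAll_spec (by decide))]
        rw [lhs, rhs, show (c :: t).drop pvK1.length = t.drop (pvK1.length - 1) from rfl,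
          ih _ (by simp [List.length_drop]; omega)]
      have b1 : pvK1.isPrefixOf (c :: t) = false := by simpa only [Bool.not_eq_true] using h1
      by_cases h2 : pvK2.isPrefixOf (c :: t) = true
      · have hpre : pvK2 <+: (c :: t) := List.isPrefixOf_iff_prefix.mp h2
        have heq : pvK2 ++ (c :: t).drop pvK2.length = c :: t := List.prefix_iff_eq_append.mp hpre
        have hf : List.find? (fun kv => kv.1.isPrefixOf (c :: t)) pvTbl = some (pvK2, pvV2) := by
          simp [pvTbl, b1, h2]
        have rhs : pvScan pvTbl (c :: t) = pvV2 ++ pvScan pvTbl (t.drop (pvK2.length - 1)) := by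
          rw [pvScan, hf]
        have lhs : pvChain (c :: t) = pvV2 ++ pvChain ((c :: t).drop pvK2.length) := by
          conv_lhs => rw [← heq]
          simp only [pvChain]
          rw [pvPass pvK1 pvV1 pvK2 (pvCondAll_spec (by decide))]
          rw [pvHead pvK2 pvV2 _ (by decide)]
          rw [pvPass pvK3 pvV3 pvV2 (pvCondAll_spec (by decide))]
          rw [pvPass pvK4 pvV4 pvV2 (pvCondAll_spec (by decide))]
          rw [pvPass pvK5 pvV5 pvV2 (pvCondAll_spec (by decide))]
          rw [pvPass pvK6 pvV6 pvV2 (pvCondAll_spec (by decide))]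
          rw [pvPass pvK7 pvV7 pvV2 (pvCondAll_spec (by decide))]
        rw [lhs, rhs, show (c :: t).drop pvK2.length = t.drop (pvK2.length - 1) from rfl,
          ih _ (by simp [List.length_drop]; omega)]
      have b2 : pvK2.isPrefixOf (c :: t) = false := by simpa only [Bool.not_eq_true] using h2
      by_cases h3 : pvK3.isPrefixOf (c :: t) = true
      · have hpre : pvK3 <+: (c :: t) := List.isPrefixOf_iff_prefix.mp h3
        have heq : pvK3 ++ (c :: t).drop pvK3.length = c :: t := List.prefix_iff_eq_append.mp hpre
        have hf : List.find? (fun kv => kv.1.isPrefixOf (c :: t)) pvTbl = some (pvK3, pvV3) := by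
          simp [pvTbl, b1, b2, h3]
        have rhs : pvScan pvTbl (c :: t) = pvV3 ++ pvScan pvTbl (t.drop (pvK3.length - 1)) := by
          rw [pvScan, hf]
        have lhs : pvChain (c :: t) = pvV3 ++ pvChain ((c :: t).drop pvK3.length) := by
          conv_lhs => rw [← heq]
          simp only [pvChain]
          rw [pvPass pvK1 pvV1 pvK3 (pvCondAll_spec (by decide))]
          rw [pvPass pvK2 pvV2 pvK3 (pvCondAll_spec (by decide))]
          rw [pvHead pvK3 pvV3 _ (by decide)]
          rw [pvPass pvK4 pvV4 pvV3 (pvCondAll_spec (by decide))]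
          rw [pvPass pvK5 pvV5 pvV3 (pvCondAll_spec (by decide))]
          rw [pvPass pvK6 pvV6 pvV3 (pvCondAll_spec (by decide))]
          rw [pvPass pvK7 pvV7 pvV3 (pvCondAll_spec (by decide))]
        rw [lhs, rhs, show (c :: t).drop pvK3.length = t.drop (pvK3.length - 1) from rfl,
          ih _ (by simp [List.length_drop]; omega)]
      have b3 : pvK3.isPrefixOf (c :: t) = false := by simpa only [Bool.not_eq_true] using h3
      by_cases h4 : pvK4.isPrefixOf (c :: t) = true
      · have hpre : pvK4 <+: (c :: t) := List.isPrefixOf_iff_prefix.mp h4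
        have heq : pvK4 ++ (c :: t).drop pvK4.length = c :: t := List.prefix_iff_eq_append.mp hpre
        have hf : List.find? (fun kv => kv.1.isPrefixOf (c :: t)) pvTbl = some (pvK4, pvV4) := by
          simp [pvTbl, b1, b2, b3, h4]
        have rhs : pvScan pvTbl (c :: t) = pvV4 ++ pvScan pvTbl (t.drop (pvK4.length - 1)) := by
          rw [pvScan, hf]
        have lhs : pvChain (c :: t) = pvV4 ++ pvChain ((c :: t).drop pvK4.length) := by
          conv_lhs => rw [← heq]
          simp only [pvChain]
          rw [pvPass pvK1 pvV1 pvK4 (pvCondAll_spec (by decide))]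
          rw [pvPass pvK2 pvV2 pvK4 (pvCondAll_spec (by decide))]
          rw [pvPass pvK3 pvV3 pvK4 (pvCondAll_spec (by decide))]
          rw [pvHead pvK4 pvV4 _ (by decide)]
          rw [pvPass pvK5 pvV5 pvV4 (pvCondAll_spec (by decide))]
          rw [pvPass pvK6 pvV6 pvV4 (pvCondAll_spec (by decide))]
          rw [pvPass pvK7 pvV7 pvV4 (pvCondAll_spec (by decide))]
        rw [lhs, rhs, show (c :: t).drop pvK4.length = t.drop (pvK4.length - 1) from rfl,
          ih _ (by simp [List.length_drop]; omega)]
      have b4 : pvK4.isPrefixOf (c :: t) = false := by simpa only [Bool.not_eq_true] using h4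
      by_cases h5 : pvK5.isPrefixOf (c :: t) = true
      · have hpre : pvK5 <+: (c :: t) := List.isPrefixOf_iff_prefix.mp h5
        have heq : pvK5 ++ (c :: t).drop pvK5.length = c :: t := List.prefix_iff_eq_append.mp hpre
        have hf : List.find? (fun kv => kv.1.isPrefixOf (c :: t)) pvTbl = some (pvK5, pvV5) := by
          simp [pvTbl, b1, b2, b3, b4, h5]
        have rhs : pvScan pvTbl (c :: t) = pvV5 ++ pvScan pvTbl (t.drop (pvK5.length - 1)) := by
          rw [pvScan, hf]
        have lhs : pvChain (c :: t) = pvV5 ++ pvChain ((c :: t).drop pvK5.length) := by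
          conv_lhs => rw [← heq]
          simp only [pvChain]
          rw [pvPass pvK1 pvV1 pvK5 (pvCondAll_spec (by decide))]
          rw [pvPass pvK2 pvV2 pvK5 (pvCondAll_spec (by decide))]
          rw [pvPass pvK3 pvV3 pvK5 (pvCondAll_spec (by decide))]
          rw [pvPass pvK4 pvV4 pvK5 (pvCondAll_spec (by decide))]
          rw [pvHead pvK5 pvV5 _ (by decide)]
          rw [pvPass pvK6 pvV6 pvV5 (pvCondAll_spec (by decide))]
          rw [pvPass pvK7 pvV7 pvV5 (pvCondAll_spec (by decide))]
        rw [lhs, rhs, show (c :: t).drop pvK5.length = t.drop (pvK5.length - 1) from rfl,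
          ih _ (by simp [List.length_drop]; omega)]
      have b5 : pvK5.isPrefixOf (c :: t) = false := by simpa only [Bool.not_eq_true] using h5
      by_cases h6 : pvK6.isPrefixOf (c :: t) = true
      · have hpre : pvK6 <+: (c :: t) := List.isPrefixOf_iff_prefix.mp h6
        have heq : pvK6 ++ (c :: t).drop pvK6.length = c :: t := List.prefix_iff_eq_append.mp hpre
        have hf : List.find? (fun kv => kv.1.isPrefixOf (c :: t)) pvTbl = some (pvK6, pvV6) := by
          simp [pvTbl, b1, b2, b3, b4, b5, h6]
        have rhs : pvScan pvTbl (c :: t) = pvV6 ++ pvScan pvTbl (t.drop (pvK6.length - 1)) := by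
          rw [pvScan, hf]
        have lhs : pvChain (c :: t) = pvV6 ++ pvChain ((c :: t).drop pvK6.length) := by
          conv_lhs => rw [← heq]
          simp only [pvChain]
          rw [pvPass pvK1 pvV1 pvK6 (pvCondAll_spec (by decide))]
          rw [pvPass pvK2 pvV2 pvK6 (pvCondAll_spec (by decide))]
          rw [pvPass pvK3 pvV3 pvK6 (pvCondAll_spec (by decide))]
          rw [pvPass pvK4 pvV4 pvK6 (pvCondAll_spec (by decide))]
          rw [pvPass pvK5 pvV5 pvK6 (pvCondAll_spec (by decide))]
          rw [pvHead pvK6 pvV6 _ (by decide)]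
          rw [pvPass pvK7 pvV7 pvV6 (pvCondAll_spec (by decide))]
        rw [lhs, rhs, show (c :: t).drop pvK6.length = t.drop (pvK6.length - 1) from rfl,
          ih _ (by simp [List.length_drop]; omega)]
      have b6 : pvK6.isPrefixOf (c :: t) = false := by simpa only [Bool.not_eq_true] using h6
      by_cases h7 : pvK7.isPrefixOf (c :: t) = true
      · have hpre : pvK7 <+: (c :: t) := List.isPrefixOf_iff_prefix.mp h7
        have heq : pvK7 ++ (c :: t).drop pvK7.length = c :: t := List.prefix_iff_eq_append.mp hpre
        have hf : List.find? (fun kv => kv.1.isPrefixOf (c :: t)) pvTbl = some (pvK7, pvV7) := by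
          simp [pvTbl, b1, b2, b3, b4, b5, b6, h7]
        have rhs : pvScan pvTbl (c :: t) = pvV7 ++ pvScan pvTbl (t.drop (pvK7.length - 1)) := by
          rw [pvScan, hf]
        have lhs : pvChain (c :: t) = pvV7 ++ pvChain ((c :: t).drop pvK7.length) := by
          conv_lhs => rw [← heq]
          simp only [pvChain]
          rw [pvPass pvK1 pvV1 pvK7 (pvCondAll_spec (by decide))]
          rw [pvPass pvK2 pvV2 pvK7 (pvCondAll_spec (by decide))]
          rw [pvPass pvK3 pvV3 pvK7 (pvCondAll_spec (by decide))]
          rw [pvPass pvK4 pvV4 pvK7 (pvCondAll_spec (by decide))]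
          rw [pvPass pvK5 pvV5 pvK7 (pvCondAll_spec (by decide))]
          rw [pvPass pvK6 pvV6 pvK7 (pvCondAll_spec (by decide))]
          rw [pvHead pvK7 pvV7 _ (by decide)]
        rw [lhs, rhs, show (c :: t).drop pvK7.length = t.drop (pvK7.length - 1) from rfl,
          ih _ (by simp [List.length_drop]; omega)]
      have b7 : pvK7.isPrefixOf (c :: t) = false := by simpa only [Bool.not_eq_true] using h7
      have p1 : ¬ pvK1 <+: (c :: t) := by rw [← List.isPrefixOf_iff_prefix]; simp [b1]
      have p2 : ¬ pvK2 <+: (c :: t) := by rw [← List.isPrefixOf_iff_prefix]; simp [b2]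
      have p3 : ¬ pvK3 <+: (c :: t) := by rw [← List.isPrefixOf_iff_prefix]; simp [b3]
      have p4 : ¬ pvK4 <+: (c :: t) := by rw [← List.isPrefixOf_iff_prefix]; simp [b4]
      have p5 : ¬ pvK5 <+: (c :: t) := by rw [← List.isPrefixOf_iff_prefix]; simp [b5]
      have p6 : ¬ pvK6 <+: (c :: t) := by rw [← List.isPrefixOf_iff_prefix]; simp [b6]
      have p7 : ¬ pvK7 <+: (c :: t) := by rw [← List.isPrefixOf_iff_prefix]; simp [b7]
      have m2_1 :=
        pvConsTransfer pvK1 pvV1 pvK2 (by decide) c (t) p2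
      have m3_1 :=
        pvConsTransfer pvK1 pvV1 pvK3 (by decide) c (t) p3
      have m3_2 :=
        pvConsTransfer pvK2 pvV2 pvK3 (by decide) c (pvRep pvK1 pvV1 (t)) m3_1
      have m4_1 :=
        pvConsTransfer pvK1 pvV1 pvK4 (by decide) c (t) p4
      have m4_2 :=
        pvConsTransfer pvK2 pvV2 pvK4 (by decide) c (pvRep pvK1 pvV1 (t)) m4_1
      have m4_3 :=
        pvConsTransfer pvK3 pvV3 pvK4 (by decide) c (pvRep pvK2 pvV2 (pvRep pvK1 pvV1 (t))) m4_2
      have m5_1 :=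
        pvConsTransfer pvK1 pvV1 pvK5 (by decide) c (t) p5
      have m5_2 :=
        pvConsTransfer pvK2 pvV2 pvK5 (by decide) c (pvRep pvK1 pvV1 (t)) m5_1
      have m5_3 :=
        pvConsTransfer pvK3 pvV3 pvK5 (by decide) c (pvRep pvK2 pvV2 (pvRep pvK1 pvV1 (t))) m5_2
      have m5_4 :=
        pvConsTransfer pvK4 pvV4 pvK5 (by decide) c (pvRep pvK3 pvV3 (pvRep pvK2 pvV2 (pvRep pvK1 pvV1 (t)))) m5_3
      have m6_1 :=
        pvConsTransfer pvK1 pvV1 pvK6 (by decide) c (t) p6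
      have m6_2 :=
        pvConsTransfer pvK2 pvV2 pvK6 (by decide) c (pvRep pvK1 pvV1 (t)) m6_1
      have m6_3 :=
        pvConsTransfer pvK3 pvV3 pvK6 (by decide) c (pvRep pvK2 pvV2 (pvRep pvK1 pvV1 (t))) m6_2
      have m6_4 :=
        pvConsTransfer pvK4 pvV4 pvK6 (by decide) c (pvRep pvK3 pvV3 (pvRep pvK2 pvV2 (pvRep pvK1 pvV1 (t)))) m6_3
      have m6_5 :=
        pvConsTransfer pvK5 pvV5 pvK6 (by decide) c (pvRep pvK4 pvV4 (pvRep pvK3 pvV3 (pvRep pvK2 pvV2 (pvRep pvK1 pvV1 (t))))) m6_4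
      have m7_1 :=
        pvConsTransfer pvK1 pvV1 pvK7 (by decide) c (t) p7
      have m7_2 :=
        pvConsTransfer pvK2 pvV2 pvK7 (by decide) c (pvRep pvK1 pvV1 (t)) m7_1
      have m7_3 :=
        pvConsTransfer pvK3 pvV3 pvK7 (by decide) c (pvRep pvK2 pvV2 (pvRep pvK1 pvV1 (t))) m7_2
      have m7_4 :=
        pvConsTransfer pvK4 pvV4 pvK7 (by decide) c (pvRep pvK3 pvV3 (pvRep pvK2 pvV2 (pvRep pvK1 pvV1 (t)))) m7_3
      have m7_5 :=
        pvConsTransfer pvK5 pvV5 pvK7 (by decide) c (pvRep pvK4 pvV4 (pvRep pvK3 pvV3 (pvRep pvK2 pvV2 (pvRep pvK1 pvV1 (t))))) m7_4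
      have m7_6 :=
        pvConsTransfer pvK6 pvV6 pvK7 (by decide) c (pvRep pvK5 pvV5 (pvRep pvK4 pvV4 (pvRep pvK3 pvV3 (pvRep pvK2 pvV2 (pvRep pvK1 pvV1 (t)))))) m7_5
      have lhs : pvChain (c :: t) = c :: pvChain t := by
        simp only [pvChain]
        rw [pvRep_cons_neg pvK1 pvV1 (pvNotPrefix_bool p1),
          pvRep_cons_neg pvK2 pvV2 (pvNotPrefix_bool m2_1),
          pvRep_cons_neg pvK3 pvV3 (pvNotPrefix_bool m3_2),
          pvRep_cons_neg pvK4 pvV4 (pvNotPrefix_bool m4_3),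
          pvRep_cons_neg pvK5 pvV5 (pvNotPrefix_bool m5_4),
          pvRep_cons_neg pvK6 pvV6 (pvNotPrefix_bool m6_5),
          pvRep_cons_neg pvK7 pvV7 (pvNotPrefix_bool m7_6)]
      have hf : List.find? (fun kv => kv.1.isPrefixOf (c :: t)) pvTbl = none := by
        simp [pvTbl, b1, b2, b3, b4, b5, b6, b7]
      have rhs : pvScan pvTbl (c :: t) = c :: pvScan pvTbl t := by rw [pvScan, hf]
      rw [lhs, rhs, ih t ht]

-- ===== VERDICT (by name: the statement is the Claim_ definition above) =====
theorem correct_typos_spec : Claim_equal_correct_typos := by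
  intro u _
  show correct_typos u = correct_typos_alt u
  have h3 : (correct_typos_alt u).toList = pvScan pvTbl (PySem.Chars.lower u.toList) := by
    simp [correct_typos_alt, String.toList_ofList, PySem.Str.lower]
    rw [show pvTblB = pvTbl from rfl]
  have h4 : (correct_typos u).toList = (correct_typos_alt u).toList := by
    rw [pvA_toList u, pvMain (PySem.Chars.lower u.toList).length _ le_rfl, h3]
  calc correct_typos u = String.ofList (correct_typos u).toList := String.ofList_toList.symm
    _ = String.ofList (correct_typos_alt u).toList := by rw [h4]
    _ = correct_typos_alt u := String.ofList_toList
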